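-- pv_equiv track=rewrite | github.com/svenwelink/AdventOfCode | 2023/day13.py | runPartTwo
-- ===== SOURCE A (Python) =====
-- def transposeList(frame):
--   transposedFrame = []
--   for columnId in range(len(frame[0])):
--     newRow = ""
--     for rowId in range(len(frame)):
--       newRow += frame[rowId][columnId]
--     transposedFrame.append(newRow)
--   return(transposedFrame)
--
-- def runPartTwo(data):
--   mirrorPoints = 0
--   lastWhiteLineIndex = 0
--   for i in range(len(data)):
--     if len(data[i].strip()) == 0:
--       frame = getFrame(data, lastWhiteLineIndex, i)
--       points = getPointsFrameTwo(frame)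
--       mirrorPoints += points
--       lastWhiteLineIndex = i + 1
--
--   # Get last frame
--   frame = getFrame(data, lastWhiteLineIndex, len(data))
--   points = getPointsFrameTwo(frame)
--   mirrorPoints += points
--   return(mirrorPoints)
--
-- def getFrame(data, firstRow, lastRowPlusOne):
--   frame = []
--   for i in range(firstRow, lastRowPlusOne):
--     row, rowList = data[i].strip(), []
--     for j in range(len(row)):
--       rowList.append(row[j])
--     frame.append(row)
--   return(frame)
--
-- def getHorizontalMirrorTwo(frame):
--   for rowId in range(1, len(frame)):
--     upperFrame, lowerFrame = frame[:rowId], frame[rowId:len(frame)]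
--     rowsToCheck = min(len(upperFrame), len(lowerFrame))
--
--     if len(upperFrame) < len(lowerFrame):
--       lowerPartFrame = lowerFrame[:rowsToCheck]
--       lowerPartFrame.reverse()
--       if checkFrameOneDiffrentSign(upperFrame, lowerPartFrame):
--         return(rowId)
--
--     else:
--       upperPartFrame = upperFrame[len(upperFrame) - rowsToCheck:]
--       lowerFrame.reverse()
--       if checkFrameOneDiffrentSign(upperPartFrame, lowerFrame):
--         return(rowId)
--
--   return(0)
--
-- def checkFrameOneDiffrentSign(frameOne, frameTwo):
--   difference = 0
--   for i in range(len(frameOne)):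
--     for j in range(len(frameOne[i])):
--       if frameOne[i][j] != frameTwo[i][j]:
--         difference += 1
--
--   if difference == 1:
--     return(True)
--   return(False)
--
-- def getPointsFrameTwo(frame):
--   horizontalRow = getHorizontalMirrorTwo(frame)
--   if horizontalRow != 0:
--     points = 100 * (horizontalRow)
--   else:
--     flippedFrame = transposeList(frame)
--     verticalRow = getHorizontalMirrorTwo(flippedFrame)
--     points = verticalRow
--   return(points)
-- ===== SOURCE B (Python) =====
-- # B: instead of re-scanning the grid for each candidate reflection line, aggregate
-- # all pairwise row mismatch counts once into a dict keyed by anti-diagonal i+j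
-- # (a reflection at r uses exactly the pairs with i+j == 2r-1), then pick the first
-- # candidate whose diagonal total is exactly 1; frames come from a single
-- # sentinel-driven pass over the lines.
--
-- def _mirror(rows):
--     n = len(rows)
--     diag = {}
--     for i in range(n):
--         for j in range(i + 1, n):
--             if (i + j) % 2:
--                 diag[i + j] = diag.get(i + j, 0) + sum(a != b for a, b in zip(rows[i], rows[j]))
--     for r in range(1, n):
--         if diag.get(2 * r - 1, 0) == 1:
--             return r
--     return 0
--
-- def _score(frame):
--     r = _mirror(frame)
--     if r:
--         return 100 * r
--     cols = [[row[j] for row in frame] for j in range(len(frame[0]))]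
--     return _mirror(cols)
--
-- def runPartTwo(data):
--     total = 0
--     frame = []
--     for line in list(data) + [""]:
--         s = line.strip()
--         if s:
--             frame.append(s)
--         else:
--             total += _score(frame)
--             frame = []
--     return total
-- ===== Notes on version B (the rewrite author's own statement) =====
-- stated objective: alternative
-- what changed: Per-frame reflection search is reorganised: instead of A's per-candidate slice/reverse/rescan of the grid, B aggregates every pairwise row mismatch count once into a dict keyed by the anti-diagonal i+j (a reflection at r uses exactly the pairs with i+j = 2r-1) and then picks the first candidate whose diagonal total is 1; frames are split by one sentinel-driven pass instead of index bookkeeping.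
-- outside the precondition, e.g. on runPartTwo(['a', 'ab']): A returns 0, B returns 0; on runPartTwo(['a', 'ab', 'a']): A raises IndexError, B returns 0
import Mathlib
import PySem

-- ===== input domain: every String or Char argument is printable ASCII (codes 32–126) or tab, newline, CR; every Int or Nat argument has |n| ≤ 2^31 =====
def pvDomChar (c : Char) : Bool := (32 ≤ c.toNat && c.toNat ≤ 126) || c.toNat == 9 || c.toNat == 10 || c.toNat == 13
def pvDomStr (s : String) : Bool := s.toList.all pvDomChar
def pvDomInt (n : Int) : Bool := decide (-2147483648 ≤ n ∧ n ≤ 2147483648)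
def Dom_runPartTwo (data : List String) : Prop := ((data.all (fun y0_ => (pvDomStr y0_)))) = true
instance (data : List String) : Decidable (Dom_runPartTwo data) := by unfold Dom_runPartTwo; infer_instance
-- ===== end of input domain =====

-- B replaces A's per-candidate slice/reverse rescan of each grid by one aggregation of all
-- pairwise row mismatch counts into a dict keyed by the anti-diagonal i+j (a reflection at r
-- uses exactly the pairs with i+j = 2r-1), and splits frames in one sentinel-driven pass
-- (objective: alternative).

-- ===== PORT A =====

-- checkFrameOneDiffrentSign: nested index loops counting mismatches, then == 1
def pvCheckFrame (f1 f2 : List String) : Bool :=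
  ((List.range f1.length).foldl (fun d i =>
    (List.range (f1.getD i "").toList.length).foldl (fun d j =>
      if (f1.getD i "").toList.getD j ' ' ≠ (f2.getD i "").toList.getD j ' ' then d + 1 else d) d)
    (0 : Int)) == 1

-- getHorizontalMirrorTwo: first rowId in range(1, len) whose branch-check succeeds, else 0
def pvHorizA (frame : List String) : Int :=
  match (List.range' 1 (frame.length - 1)).find? (fun rowId =>
    let upper := frame.take rowId
    let lower := frame.drop rowId
    let k := min upper.length lower.length
    if upper.length < lower.length then
      pvCheckFrame upper ((lower.take k).reverse)
    else
      pvCheckFrame (upper.drop (upper.length - k)) lower.reverse) with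
  | some r => (r : Int)
  | none => 0

-- transposeList: for each column index, build the new row character by character
def pvTransposeA (frame : List String) : List String :=
  (List.range (frame.getD 0 "").toList.length).foldl (fun acc c =>
    acc ++ [String.ofList ((List.range frame.length).foldl (fun row r =>
      row ++ [(frame.getD r "").toList.getD c ' ']) [])]) []

-- getFrame: strip of each line of data[firstRow:lastRowPlusOne]
def pvGetFrame (data : List String) (a b : Nat) : List String :=
  (List.range' a (b - a)).foldl (fun acc i => acc ++ [PySem.Str.strip (data.getD i "")]) []

-- getPointsFrameTwo
def pvPointsA (frame : List String) : Int :=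
  let h := pvHorizA frame
  if h ≠ 0 then 100 * h else pvHorizA (pvTransposeA frame)

-- body of A's main loop: state (mirrorPoints, lastWhiteLineIndex)
def pvStepA (data : List String) (st : Int × Nat) (i : Nat) : Int × Nat :=
  if (PySem.Str.strip (data.getD i "")).toList.length == 0 then
    (st.1 + pvPointsA (pvGetFrame data st.2 i), i + 1)
  else st

def runPartTwo (data : List String) : Int :=
  let st := (List.range data.length).foldl (pvStepA data) (0, 0)
  st.1 + pvPointsA (pvGetFrame data st.2 data.length)

-- ===== PORT B =====

-- sum(a != b for a, b in zip(x, y))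
def pvHam (x y : List Char) : Int := ((x.zip y).countP (fun p => decide (p.1 ≠ p.2)) : Int)

-- the anti-diagonal dict: diag[i+j] accumulates the mismatch count of every row pair i < j with i+j odd
def pvDiagB (rows : List (List Char)) : PySem.Dict Nat Int :=
  (List.range rows.length).foldl (fun d i =>
    (List.range' (i + 1) (rows.length - (i + 1))).foldl (fun d j =>
      if (i + j) % 2 == 1 then
        d.insert (i + j) (d.getD (i + j) 0 + pvHam (rows.getD i []) (rows.getD j []))
      else d) d) PySem.Dict.empty

-- _mirror: first r whose diagonal total is exactly 1
def pvMirrorB (rows : List (List Char)) : Int :=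
  let diag := pvDiagB rows
  match (List.range' 1 (rows.length - 1)).find? (fun r => diag.getD (2 * r - 1) 0 == 1) with
  | some r => (r : Int)
  | none => 0

-- _score: horizontal first, else the column lists
def pvScoreB (frame : List (List Char)) : Int :=
  let r := pvMirrorB frame
  if r ≠ 0 then 100 * r
  else pvMirrorB ((List.range (frame.getD 0 []).length).map (fun j =>
         frame.map (fun row => row.getD j ' ')))

-- body of B's loop over data + [""]: state (total, current frame of stripped rows)
def pvStepB (st : Int × List (List Char)) (line : String) : Int × List (List Char) :=
  let s := (PySem.Str.strip line).toList
  if s ≠ [] then (st.1, st.2 ++ [s])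
  else (st.1 + pvScoreB st.2, [])

def runPartTwo_alt (data : List String) : Int :=
  ((data ++ [""]).foldl pvStepB ((0 : Int), ([] : List (List Char)))).1

-- ===== PRECONDITION & SPEC =====

-- the blank-line frame decomposition of the input (stripped rows; acc = rows read so far)
def pvSegs (acc : List String) : List String → List (List String)
  | [] => [acc]
  | s :: rest =>
    if (PySem.Str.strip s).toList = [] then acc :: pvSegs [] rest
    else pvSegs (acc ++ [PySem.Str.strip s]) rest

-- a frame is good when it is nonempty and all its rows have the first row's length
def pvGoodFrame (f : List String) : Prop :=
  f ≠ [] ∧ ∀ r ∈ f, r.toList.length = (f.getD 0 "").toList.length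

-- Pre_ admits exactly the inputs whose blank-line framing yields nonempty rectangular frames —
-- the natural grid domain of the puzzle. Outside it A raises IndexError on an empty frame
-- (always) and on many ragged frames (a compared or transposed row too short); on the ragged
-- frames where A does return, B returns the same value (A's prefix comparison coincides with
-- B's zip truncation there), but the equality proved here covers the rectangular domain only.
def Pre_runPartTwo (data : List String) : Prop :=
  ∀ f ∈ pvSegs [] data, pvGoodFrame f
instance (data : List String) : Decidable (Pre_runPartTwo data) := by
  unfold Pre_runPartTwo pvGoodFrame; infer_instance

def pvWitness_runPartTwo : List String := ["#.", "#.", "", "ab"]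

def Spec_runPartTwo (data : List String) (out : Int) : Prop := out = runPartTwo_alt data
instance (data : List String) (out : Int) : Decidable (Spec_runPartTwo data out) := by
  unfold Spec_runPartTwo; infer_instance

-- ===== CLAIM (what is proved, stated in full; the proofs are below) =====
def Claim_equal_runPartTwo : Prop := ∀ (data : List String), Dom_runPartTwo data → Pre_runPartTwo data → Spec_runPartTwo data (runPartTwo data)

-- ===== LEMMAS AND PROOFS =====

-- getD variants of getElem? index lemmas
lemma pvGetD_take (l : List String) (n i : Nat) (h : i < n) :
    (l.take n).getD i "" = l.getD i "" := by
  rw [List.getD_eq_getElem?_getD, List.getD_eq_getElem?_getD, List.getElem?_take]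
  simp [h]

lemma pvGetD_drop (l : List String) (n i : Nat) :
    (l.drop n).getD i "" = l.getD (n + i) "" := by
  rw [List.getD_eq_getElem?_getD, List.getD_eq_getElem?_getD, List.getElem?_drop]

lemma pvGetD_reverse (l : List String) (i : Nat) (h : i < l.length) :
    l.reverse.getD i "" = l.getD (l.length - 1 - i) "" := by
  rw [List.getD_eq_getElem?_getD, List.getD_eq_getElem?_getD, List.getElem?_reverse h]

-- getD of map toList
lemma pvGetD_map_toList (f : List String) (p : Nat) :
    (f.map String.toList).getD p [] = (f.getD p "").toList := by
  rw [List.getD_eq_getElem?_getD, List.getD_eq_getElem?_getD]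
  rcases h : f[p]? with _ | s
  · simp [List.getElem?_map, h]
  · simp [List.getElem?_map, h]

-- mismatch count by index loop = mismatch count over the zip, for rows of equal length w
lemma pvMismatch_eq (x y : List Char) (w : Nat) (hx : x.length = w) (hy : y.length = w) :
    (List.range w).countP (fun j => decide (x.getD j ' ' ≠ y.getD j ' '))
      = (x.zip y).countP (fun p => decide (p.1 ≠ p.2)) := by
  induction x generalizing y w with
  | nil =>
    subst hx
    simp at hy
    simp [hy]
  | cons a x ih =>
    cases y with
    | nil => simp at hx hy; omega
    | cons b y =>
      cases w with
      | zero => simp at hx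
      | succ w =>
        have hx' : x.length = w := by simpa using hx
        have hy' : y.length = w := by simpa using hy
        rw [List.range_succ_eq_map, List.countP_cons, List.countP_map]
        simp only [List.zip_cons_cons, List.countP_cons]
        have hcomp : ((fun j => decide ((a :: x).getD j ' ' ≠ (b :: y).getD j ' ')) ∘ Nat.succ)
            = (fun j => decide (x.getD j ' ' ≠ y.getD j ' ')) := by
          funext j; simp
        rw [hcomp, ← ih y w hx' hy']
        simp only [List.getD_cons_zero]

-- A's mismatch check as a sum of per-row index-loop counts
lemma pvCheckFrame_sum (f1 f2 : List String) :
    pvCheckFrame f1 f2 =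
      (((List.range f1.length).map (fun i =>
        (((List.range (f1.getD i "").toList.length).countP (fun j =>
          decide ((f1.getD i "").toList.getD j ' ' ≠ (f2.getD i "").toList.getD j ' '))) : Int))).sum == 1) := by
  unfold pvCheckFrame
  rw [PySem.List.foldl_congr_mem (g := fun (d : Int) i =>
    d + (((List.range (f1.getD i "").toList.length).countP (fun j =>
      decide ((f1.getD i "").toList.getD j ' ' ≠ (f2.getD i "").toList.getD j ' '))) : Int))]
  · rw [PySem.List.foldl_add]
    simp
  · intro acc i _
    rw [PySem.List.foldl_ite_add_one]

-- A's check equals the zip-mismatch sum when both frames have rows of width w and equal length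
lemma pvCheckFrame_eq_ham (f1 f2 : List String) (w : Nat)
    (h1 : ∀ x ∈ f1, x.toList.length = w) (h2 : ∀ x ∈ f2, x.toList.length = w)
    (hlen : f1.length = f2.length) :
    pvCheckFrame f1 f2 =
      (((List.range f1.length).map (fun i =>
        pvHam (f1.getD i "").toList (f2.getD i "").toList)).sum == 1) := by
  rw [pvCheckFrame_sum]
  have hcongr : ∀ i ∈ List.range f1.length,
      (((List.range (f1.getD i "").toList.length).countP (fun j =>
        decide ((f1.getD i "").toList.getD j ' ' ≠ (f2.getD i "").toList.getD j ' '))) : Int)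
      = pvHam (f1.getD i "").toList (f2.getD i "").toList := by
    intro i hi
    have hi' := List.mem_range.mp hi
    have hx : (f1.getD i "").toList.length = w := by
      rw [List.getD_eq_getElem f1 "" hi']
      exact h1 _ (List.getElem_mem hi')
    have hy : (f2.getD i "").toList.length = w := by
      have hi2 : i < f2.length := by omega
      rw [List.getD_eq_getElem f2 "" hi2]
      exact h2 _ (List.getElem_mem hi2)
    rw [pvHam, hx, pvMismatch_eq _ _ w hx hy]
  rw [List.map_congr_left hcongr]

-- the canonical mirrored-overlap mismatch sum at candidate r
def pvS (rows : List (List Char)) (r : Nat) : Int :=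
  ((List.range' (r - min r (rows.length - r)) (min r (rows.length - r))).map
    (fun i => pvHam (rows.getD i []) (rows.getD (2 * r - 1 - i) []))).sum

-- find? congruence on members
lemma pvFind?_congr {α : Type} (l : List α) (p q : α → Bool) (h : ∀ x ∈ l, p x = q x) :
    l.find? p = l.find? q := by
  induction l with
  | nil => rfl
  | cons a l ih =>
    simp only [List.find?]
    rw [h a (List.mem_cons_self)]
    cases q a
    · exact ih (fun x hx => h x (List.mem_cons_of_mem _ hx))
    · rfl

-- dict fold with per-element added value: lookup is the sum over matching keys
lemma pvGetD_foldl_insert_add {α : Type} (l : List α) (key : α → Nat) (v : α → Int)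
    (d : PySem.Dict Nat Int) (s : Nat) :
    (l.foldl (fun d a => d.insert (key a) (d.getD (key a) 0 + v a)) d).getD s 0
      = d.getD s 0 + ((l.filter (fun a => key a == s)).map v).sum := by
  induction l generalizing d with
  | nil => simp
  | cons a l ih =>
    rw [List.foldl_cons, ih, List.filter_cons]
    by_cases hk : key a = s
    · subst hk
      simp [PySem.Dict.getD_insert_self]
      ring
    · have hbf : (key a == s) = false := by simp [hk]
      rw [hbf]
      simp only [Bool.false_eq_true, if_false]
      rw [PySem.Dict.getD_insert_of_ne _ _ _ (fun h => hk h.symm)]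

-- the pair list B's nested loops traverse
def pvPairs (n : Nat) : List (Nat × Nat) :=
  (List.range n).flatMap (fun i => (List.range' (i + 1) (n - (i + 1))).map (fun j => (i, j)))

-- B's dict as a fold over the flattened pair list
lemma pvDiagB_eq_pairs (rows : List (List Char)) :
    pvDiagB rows = ((pvPairs rows.length).filter (fun p => (p.1 + p.2) % 2 == 1)).foldl
      (fun d p => d.insert (p.1 + p.2)
        (d.getD (p.1 + p.2) 0 + pvHam (rows.getD p.1 []) (rows.getD p.2 []))) PySem.Dict.empty := by
  unfold pvDiagB pvPairs
  rw [← PySem.List.foldl_if_eq_foldl_filter, List.foldl_flatMap]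
  simp only [List.foldl_map]

-- sum of a filtered map is the sum of the guarded map
lemma pvSum_filter_eq {α : Type} (l : List α) (q : α → Bool) (v : α → Int) :
    ((l.filter q).map v).sum = (l.map (fun a => if q a then v a else 0)).sum := by
  induction l with
  | nil => simp
  | cons a l ih =>
    rw [List.filter_cons]
    by_cases h : q a
    · simp [h, ih]
    · simp [h, ih]

-- a guarded sum over a range with a single possible hit
lemma pvSum_range'_single (a : Nat) (len : Nat) (c : Nat) (g : Nat → Int) :
    ((List.range' a len).map (fun j => if j = c then g j else 0)).sum
      = if a ≤ c ∧ c < a + len then g c else 0 := by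
  induction len generalizing a with
  | zero => rw [if_neg (by omega)]; simp
  | succ m ih =>
    rw [List.range'_succ, List.map_cons, List.sum_cons, ih (a + 1)]
    by_cases h : a = c
    · subst h; rw [if_pos rfl, if_neg (by omega), if_pos (by omega)]; ring
    · rw [if_neg h]
      by_cases h2 : a + 1 ≤ c ∧ c < a + 1 + m
      · rw [if_pos h2, if_pos (by omega)]; ring
      · rw [if_neg h2, if_neg (by omega)]; ring

-- splitting an initial range at two cut points
lemma pvRange_split (a b n : Nat) (hab : a ≤ b) (hbn : b ≤ n) :
    List.range' 0 n = (List.range' 0 a ++ List.range' a (b - a)) ++ List.range' b (n - b) := by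
  have e1 : List.range' 0 a ++ List.range' a (b - a) = List.range' 0 b := by
    have h := List.range'_append_1 (s := 0) (m := a) (n := b - a)
    simpa [Nat.add_sub_cancel' hab] using h
  have e2 : List.range' 0 b ++ List.range' b (n - b) = List.range' 0 n := by
    have h := List.range'_append_1 (s := 0) (m := b) (n := n - b)
    simpa [Nat.add_sub_cancel' hbn] using h
  rw [e1, e2]

-- sum of a map over a flatMap, blockwise
lemma pvSum_map_flatMap {α β : Type} (l : List α) (g : α → List β) (F : β → Int) :
    ((l.flatMap g).map F).sum = (l.map (fun a => ((g a).map F).sum)).sum := by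
  induction l with
  | nil => simp
  | cons a l ih => simp [List.flatMap_cons, ih]

-- the diagonal lookup is the canonical mirrored sum
lemma pvDiag_getD (rows : List (List Char)) (r : Nat) (h1 : 1 ≤ r) (h2 : r < rows.length) :
    (pvDiagB rows).getD (2 * r - 1) 0 = pvS rows r := by
  rw [pvDiagB_eq_pairs]
  rw [show (List.foldl (fun d p => d.insert (p.1 + p.2)
        (d.getD (p.1 + p.2) 0 + pvHam (rows.getD p.1 []) (rows.getD p.2 [])))
        PySem.Dict.empty ((pvPairs rows.length).filter (fun p => (p.1 + p.2) % 2 == 1))).getD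
        (2 * r - 1) 0
      = PySem.Dict.empty.getD (2 * r - 1) 0
        + ((((pvPairs rows.length).filter (fun p => (p.1 + p.2) % 2 == 1)).filter
            (fun p => p.1 + p.2 == 2 * r - 1)).map
              (fun p => pvHam (rows.getD p.1 []) (rows.getD p.2 []))).sum
    from pvGetD_foldl_insert_add _ _ _ _ _]
  rw [PySem.Dict.getD_empty, zero_add]
  rw [List.filter_filter]
  have hfc : ∀ p ∈ pvPairs rows.length,
      ((p.1 + p.2 == 2 * r - 1) && ((p.1 + p.2) % 2 == 1)) = (p.1 + p.2 == 2 * r - 1) := by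
    intro p _
    by_cases h : p.1 + p.2 = 2 * r - 1
    · simp [h]
      omega
    · simp [h]
  rw [List.filter_congr hfc, pvSum_filter_eq]
  unfold pvPairs
  rw [pvSum_map_flatMap]
  simp only [List.map_map]
  have hinner : ∀ i ∈ List.range rows.length,
      ((List.range' (i + 1) (rows.length - (i + 1))).map
        ((fun p : Nat × Nat => if (p.1 + p.2 == 2 * r - 1) = true
            then pvHam (rows.getD p.1 []) (rows.getD p.2 []) else 0) ∘ (fun j => (i, j)))).sum
      = (if i + 1 ≤ 2 * r - 1 - i ∧ 2 * r - 1 - i < rows.length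
          then pvHam (rows.getD i []) (rows.getD (2 * r - 1 - i) []) else 0) := by
    intro i hi
    have hin := List.mem_range.mp hi
    have hg : ∀ j ∈ List.range' (i + 1) (rows.length - (i + 1)),
        ((fun p : Nat × Nat => if (p.1 + p.2 == 2 * r - 1) = true
            then pvHam (rows.getD p.1 []) (rows.getD p.2 []) else 0) ∘ (fun j => (i, j))) j
        = (fun j => if j = 2 * r - 1 - i
            then pvHam (rows.getD i []) (rows.getD j []) else 0) j := by
      intro j hj
      have hjm := List.mem_range'_1.mp hj
      show (if (i + j == 2 * r - 1) = true
          then pvHam (rows.getD i []) (rows.getD j []) else 0) = _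
      by_cases hcs : i + j = 2 * r - 1
      · rw [if_pos (by simpa using hcs)]
        exact (if_pos (by omega)).symm
      · rw [if_neg (by simpa using hcs)]
        exact (if_neg (by omega)).symm
    rw [List.map_congr_left hg]
    rw [pvSum_range'_single (i + 1) (rows.length - (i + 1)) (2 * r - 1 - i)
      (fun j => pvHam (rows.getD i []) (rows.getD j []))]
    by_cases hcnd : i + 1 ≤ 2 * r - 1 - i ∧ 2 * r - 1 - i < i + 1 + (rows.length - (i + 1))
    · rw [if_pos hcnd, if_pos (by omega)]
    · rw [if_neg hcnd, if_neg (by omega)]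
  rw [List.map_congr_left hinner]
  -- split the outer range at the mirrored overlap
  have hsplit := pvRange_split (r - min r (rows.length - r)) r rows.length (by omega) (by omega)
  rw [show r - (r - min r (rows.length - r)) = min r (rows.length - r) from by omega] at hsplit
  rw [List.range_eq_range', hsplit, List.map_append, List.map_append, List.sum_append,
    List.sum_append]
  have hz1 : ((List.range' 0 (r - min r (rows.length - r))).map (fun i =>
      if i + 1 ≤ 2 * r - 1 - i ∧ 2 * r - 1 - i < rows.length
        then pvHam (rows.getD i []) (rows.getD (2 * r - 1 - i) []) else 0)).sum = 0 := by
    apply List.sum_eq_zero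
    intro x hx
    obtain ⟨i, hi, rfl⟩ := List.mem_map.mp hx
    have him := List.mem_range'_1.mp hi
    rw [if_neg (by omega)]
  have hz2 : ((List.range' r (rows.length - r)).map (fun i =>
      if i + 1 ≤ 2 * r - 1 - i ∧ 2 * r - 1 - i < rows.length
        then pvHam (rows.getD i []) (rows.getD (2 * r - 1 - i) []) else 0)).sum = 0 := by
    apply List.sum_eq_zero
    intro x hx
    obtain ⟨i, hi, rfl⟩ := List.mem_map.mp hx
    have him := List.mem_range'_1.mp hi
    rw [if_neg (by omega)]
  rw [hz1, hz2]
  unfold pvS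
  rw [List.map_congr_left (g := fun i =>
      pvHam (rows.getD i []) (rows.getD (2 * r - 1 - i) []))]
  · ring
  · intro i hi
    have him := List.mem_range'_1.mp hi
    rw [if_pos (by omega)]

-- A's branch test at candidate r equals (pvS = 1)
lemma pvBranch_eq (f : List String) (r : Nat)
    (hw : ∀ x ∈ f, x.toList.length = (f.getD 0 "").toList.length)
    (h1 : 1 ≤ r) (h2 : r < f.length) :
    (let upper := f.take r
     let lower := f.drop r
     let k := min upper.length lower.length
     if upper.length < lower.length then
       pvCheckFrame upper ((lower.take k).reverse)
     else
       pvCheckFrame (upper.drop (upper.length - k)) lower.reverse)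
    = (pvS (f.map String.toList) r == 1) := by
  show (if (f.take r).length < (f.drop r).length then
      pvCheckFrame (f.take r)
        (((f.drop r).take (min (f.take r).length (f.drop r).length)).reverse)
    else pvCheckFrame
        ((f.take r).drop ((f.take r).length - min (f.take r).length (f.drop r).length))
        (f.drop r).reverse)
    = (pvS (f.map String.toList) r == 1)
  have hup : (f.take r).length = r := by rw [List.length_take]; omega
  have hlow : (f.drop r).length = f.length - r := by simp
  rw [hup, hlow]
  have hSr : pvS (f.map String.toList) r
      = ((List.range' (r - min r (f.length - r)) (min r (f.length - r))).map
          (fun i => pvHam (f.getD i "").toList (f.getD (2 * r - 1 - i) "").toList)).sum := by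
    unfold pvS
    rw [List.length_map]
    apply congrArg
    apply List.map_congr_left
    intro i _
    rw [pvGetD_map_toList, pvGetD_map_toList]
  by_cases hc : r < f.length - r
  · rw [if_pos hc]
    have hk : min r (f.length - r) = r := by omega
    rw [hk]
    have hlen2 : ((f.drop r).take r).length = r := by
      rw [List.length_take, hlow]; omega
    have hrev : (((f.drop r).take r).reverse).length = r := by
      rw [List.length_reverse, hlen2]
    rw [pvCheckFrame_eq_ham (f.take r) (((f.drop r).take r).reverse)
        ((f.getD 0 "").toList.length)
        (fun x hx => hw x (List.take_subset _ _ hx))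
        (fun x hx => hw x (List.drop_subset _ _ (List.take_subset _ _ (List.mem_reverse.mp hx))))
        (by rw [hup, hrev])]
    rw [hSr, hk, show r - r = 0 from by omega, ← List.range_eq_range', hup]
    congr 1
    apply congrArg
    apply List.map_congr_left
    intro i hi
    have hir := List.mem_range.mp hi
    rw [pvGetD_take f r i hir]
    rw [pvGetD_reverse _ i (by rw [hlen2]; exact hir), hlen2]
    rw [pvGetD_take _ r _ (by omega), pvGetD_drop]
    rw [show r + (r - 1 - i) = 2 * r - 1 - i from by omega]
  · rw [if_neg hc]
    have hk : min r (f.length - r) = f.length - r := by omega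
    rw [hk]
    have htd : ((f.take r).drop (r - (f.length - r))).length = f.length - r := by
      rw [List.length_drop, hup]; omega
    have hdd : ((f.drop r).reverse).length = f.length - r := by
      rw [List.length_reverse, hlow]
    rw [pvCheckFrame_eq_ham ((f.take r).drop (r - (f.length - r))) ((f.drop r).reverse)
        ((f.getD 0 "").toList.length)
        (fun x hx => hw x (List.take_subset _ _ (List.drop_subset _ _ hx)))
        (fun x hx => hw x (List.drop_subset _ _ (List.mem_reverse.mp hx)))
        (by rw [htd, hdd])]
    rw [hSr, hk, htd, List.range'_eq_map_range, List.map_map]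
    congr 1
    apply congrArg
    apply List.map_congr_left
    intro i hi
    have hik := List.mem_range.mp hi
    simp only [Function.comp_apply]
    rw [pvGetD_drop (f.take r) (r - (f.length - r)) i]
    rw [pvGetD_take f r _ (by omega)]
    rw [pvGetD_reverse _ i (by rw [hlow]; omega), hlow]
    rw [pvGetD_drop f r _]
    rw [show r + (f.length - r - 1 - i) = 2 * r - 1 - (r - (f.length - r) + i) from by omega]

-- per-frame mirror equality on equal-width frames
lemma pvHoriz_eq (f : List String)
    (hw : ∀ x ∈ f, x.toList.length = (f.getD 0 "").toList.length) :
    pvHorizA f = pvMirrorB (f.map String.toList) := by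
  unfold pvHorizA pvMirrorB
  rw [List.length_map]
  rw [pvFind?_congr (q := fun r => (pvDiagB (f.map String.toList)).getD (2 * r - 1) 0 == 1)]
  intro r hr
  have hmem := List.mem_range'_1.mp hr
  have h1 : 1 ≤ r := hmem.1
  have h2 : r < f.length := by omega
  rw [pvBranch_eq f r hw h1 h2, pvDiag_getD _ r h1 (by simpa using h2)]

-- indexing a list over range of its length is mapping
lemma pvMap_range_getD {α β : Type} (l : List α) (d : α) (g : α → β) :
    (List.range l.length).map (fun r => g (l.getD r d)) = l.map g := by
  induction l with
  | nil => simp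
  | cons a l ih =>
    simp only [List.length_cons, List.range_succ_eq_map, List.map_cons, List.map_map,
      List.getD_cons_zero]
    congr 1

-- A's transpose, viewed as char lists, is B's column lists
lemma pvTranspose_eq (f : List String) :
    (pvTransposeA f).map String.toList
      = (List.range ((f.map String.toList).getD 0 []).length).map (fun j =>
          (f.map String.toList).map (fun row => row.getD j ' ')) := by
  unfold pvTransposeA
  rw [PySem.List.foldl_append_singleton_eq_map]
  simp only [List.nil_append, List.map_map]
  rw [pvGetD_map_toList]
  apply List.map_congr_left
  intro c _
  simp only [Function.comp_apply, String.toList_ofList]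
  rw [PySem.List.foldl_append_singleton_eq_map, List.nil_append]
  rw [pvMap_range_getD f "" (fun s => s.toList.getD c ' ')]
  rfl

-- the transpose of any frame has rows of equal length
lemma pvTranspose_good (f : List String) :
    ∀ x ∈ pvTransposeA f, x.toList.length = ((pvTransposeA f).getD 0 "").toList.length := by
  intro x hx
  have hmap := pvTranspose_eq f
  have hx' : x.toList ∈ (pvTransposeA f).map String.toList := List.mem_map_of_mem hx
  rw [hmap] at hx'
  obtain ⟨c, hc, hcd⟩ := List.mem_map.mp hx'
  have hw : 0 < ((f.map String.toList).getD 0 []).length := by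
    have := List.mem_range.mp hc; omega
  have h0 : ((pvTransposeA f).getD 0 "").toList
      = (f.map String.toList).map (fun row => row.getD 0 ' ') := by
    rw [← pvGetD_map_toList, hmap]
    have hlen : 0 < ((List.range ((f.map String.toList).getD 0 []).length).map (fun j =>
        (f.map String.toList).map (fun row => row.getD j ' '))).length := by
      simpa using hw
    rw [List.getD_eq_getElem _ [] hlen]
    simp
  rw [← hcd, h0]
  simp

-- per-frame equality on good frames
lemma pvPoints_eq (f : List String) (hg : pvGoodFrame f) :
    pvPointsA f = pvScoreB (f.map String.toList) := by
  unfold pvPointsA pvScoreB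
  rw [← pvHoriz_eq f hg.2]
  by_cases h : pvHorizA f ≠ 0
  · simp [h]
  · simp only [h]
    have hlen : ((f.map String.toList).getD 0 []).length = (f.getD 0 "").toList.length := by
      rw [pvGetD_map_toList]
    rw [show ((List.range ((f.map String.toList).getD 0 []).length).map (fun j =>
          (f.map String.toList).map (fun row => row.getD j ' ')))
        = (pvTransposeA f).map String.toList from (pvTranspose_eq f).symm]
    rw [← pvHoriz_eq (pvTransposeA f) (pvTranspose_good f)]

-- pvGetFrame facts
lemma pvGetFrame_self (data : List String) (a : Nat) : pvGetFrame data a a = [] := by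
  simp [pvGetFrame]

lemma pvGetFrame_snoc (data : List String) (a b : Nat) (hab : a ≤ b) :
    pvGetFrame data a (b + 1) = pvGetFrame data a b ++ [PySem.Str.strip (data.getD b "")] := by
  unfold pvGetFrame
  have h1 : b + 1 - a = (b - a) + 1 := by omega
  rw [h1, List.range'_concat, List.foldl_append]
  have h2 : a + 1 * (b - a) = b := by omega
  rw [h2]
  simp

-- A's main loop produces the sum of frame scores over the decomposition
lemma pvFoldA (data : List String) : ∀ (n i lwi : Nat) (mp : Int), i + n = data.length → lwi ≤ i →
    (((List.range' i n).foldl (pvStepA data) (mp, lwi)).1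
      + pvPointsA (pvGetFrame data ((List.range' i n).foldl (pvStepA data) (mp, lwi)).2 data.length))
    = mp + ((pvSegs (pvGetFrame data lwi i) (data.drop i)).map pvPointsA).sum := by
  intro n
  induction n with
  | zero =>
    intro i lwi mp hi _
    have : i = data.length := by omega
    subst this
    simp [pvSegs, List.drop_length]
  | succ n ih =>
    intro i lwi mp hi hl
    have hilt : i < data.length := by omega
    rw [List.range'_succ, List.foldl_cons]
    have hget : data.getD i "" = data[i] := by
      rw [List.getD_eq_getElem?_getD, List.getElem?_eq_getElem hilt]; rfl
    rw [List.drop_eq_getElem_cons hilt]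
    by_cases hemp : (PySem.Str.strip data[i]).toList.length = 0
    · have hnil : (PySem.Str.strip data[i]).toList = [] := List.eq_nil_of_length_eq_zero hemp
      have hc : ((PySem.Str.strip (data.getD i "")).toList.length == 0) = true := by
        rw [hget]; simpa using hemp
      have hstep : pvStepA data (mp, lwi) i = (mp + pvPointsA (pvGetFrame data lwi i), i + 1) := by
        unfold pvStepA; rw [hc]; simp
      rw [hstep, ih (i+1) (i+1) _ (by omega) (le_refl _), pvGetFrame_self]
      rw [pvSegs, if_pos hnil]
      simp [add_assoc]
    · have hc : ((PySem.Str.strip (data.getD i "")).toList.length == 0) = false := by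
        rw [hget]; simpa using hemp
      have hstep : pvStepA data (mp, lwi) i = (mp, lwi) := by
        unfold pvStepA; rw [hc]; simp
      rw [hstep, ih (i+1) lwi mp (by omega) (by omega)]
      rw [pvSegs, if_neg (by intro h; exact hemp (by rw [h]; rfl))]
      rw [pvGetFrame_snoc data lwi i hl, hget]

def pvSB (f : List String) : Int := pvScoreB (f.map String.toList)

lemma pvRunA_eq (data : List String) :
    runPartTwo data = ((pvSegs [] data).map pvPointsA).sum := by
  unfold runPartTwo
  rw [List.range_eq_range']
  have := pvFoldA data data.length 0 0 0 (by omega) (by omega)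
  rw [pvGetFrame_self] at this
  simpa using this

-- B's loop produces the same sum, skipping empty frames
lemma pvFoldB : ∀ (rest : List String) (tot : Int) (acc : List String),
    ((rest ++ [""]).foldl pvStepB (tot, acc.map String.toList)).1
      = tot + ((pvSegs acc rest).map pvSB).sum := by
  intro rest
  induction rest with
  | nil =>
    intro tot acc
    simp only [List.nil_append, List.foldl_cons, List.foldl_nil]
    have hstr : (PySem.Str.strip "").toList = [] := by decide
    have hstep : pvStepB (tot, acc.map String.toList) ""
        = (tot + pvScoreB (acc.map String.toList), []) := by
      unfold pvStepB; rw [hstr]; simp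
    rw [hstep]
    simp [pvSegs, pvSB]
  | cons s rest ih =>
    intro tot acc
    rw [List.cons_append, List.foldl_cons]
    by_cases hs : (PySem.Str.strip s).toList = []
    · have hstep : pvStepB (tot, acc.map String.toList) s
          = (tot + pvScoreB (acc.map String.toList), ([] : List String).map String.toList) := by
        unfold pvStepB; rw [hs]; simp
      rw [hstep, ih (tot + pvScoreB (acc.map String.toList)) [], pvSegs, if_pos hs]
      simp only [List.map_cons, List.sum_cons]
      rw [pvSB]
      ring
    · have hstep : pvStepB (tot, acc.map String.toList) s
          = (tot, (acc ++ [PySem.Str.strip s]).map String.toList) := by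
        have hs' : ¬ PySem.Chars.strip s.toList = [] := by simpa using hs
        unfold pvStepB; simp [hs']
      rw [hstep, ih tot (acc ++ [PySem.Str.strip s]), pvSegs, if_neg hs]

lemma pvRunB_eq (data : List String) :
    runPartTwo_alt data = ((pvSegs [] data).map pvSB).sum := by
  unfold runPartTwo_alt
  have := pvFoldB data 0 []
  simpa using this

-- ===== VERDICT (by name: the statement is the Claim_ definition above) =====
theorem runPartTwo_spec : Claim_equal_runPartTwo := by
  intro data _ hpre
  unfold Spec_runPartTwo
  rw [pvRunA_eq, pvRunB_eq]
  congr 1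
  apply List.map_congr_left
  intro f hf
  have hg := hpre f hf
  rw [pvSB]
  exact pvPoints_eq f hg
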